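-- pv_equiv track=rewrite | github.com/paula-gomez-zapata/Mating-type-genes-in-Cronartium-pini | 12_telomere_search.py | count_telomeric_repeats
-- ===== SOURCE A (Python) =====
-- repeat_length = 6     # Length of each repeat
--
-- def count_telomeric_repeats(region, pattern):
--     max_count = 0
--     current_count = 0
--     i = 0
--     while i <= len(region) - repeat_length:
--         if region[i:i + repeat_length] == pattern:
--             current_count += 1
--             i += repeat_length
--         else:
--             max_count = max(max_count, current_count)
--             current_count = 0
--             i += 1
--     return max(max_count, current_count)
-- ===== SOURCE B (Python) =====
-- repeat_length = 6     # Length of each repeat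
--
--
-- def count_telomeric_repeats(region, pattern):
--     n = len(region)
--     # run[j] = number of consecutive pattern copies starting at j (non-overlapping, stride 6),
--     # filled backward so each entry is O(1).
--     run = {}
--     for j in range(n - repeat_length, -1, -1):
--         run[j] = 1 + run.get(j + repeat_length, 0) if region[j:j + repeat_length] == pattern else 0
--     best = 0
--     i = 0
--     while i + repeat_length <= n:
--         r = run[i]
--         if r:
--             best = max(best, r)
--             i += repeat_length * r
--         else:
--             i += 1
--     return best
-- ===== Notes on version B (the rewrite author's own statement) =====
-- stated objective: alternative
-- what changed: Replaces A's single greedy pass with interleaved current/max counters by a backward dynamic-programming table of run lengths (run[j] = 1 + run[j+6] on a match, else 0) plus a forward driver that jumps over whole runs and keeps the max.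
import Mathlib
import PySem

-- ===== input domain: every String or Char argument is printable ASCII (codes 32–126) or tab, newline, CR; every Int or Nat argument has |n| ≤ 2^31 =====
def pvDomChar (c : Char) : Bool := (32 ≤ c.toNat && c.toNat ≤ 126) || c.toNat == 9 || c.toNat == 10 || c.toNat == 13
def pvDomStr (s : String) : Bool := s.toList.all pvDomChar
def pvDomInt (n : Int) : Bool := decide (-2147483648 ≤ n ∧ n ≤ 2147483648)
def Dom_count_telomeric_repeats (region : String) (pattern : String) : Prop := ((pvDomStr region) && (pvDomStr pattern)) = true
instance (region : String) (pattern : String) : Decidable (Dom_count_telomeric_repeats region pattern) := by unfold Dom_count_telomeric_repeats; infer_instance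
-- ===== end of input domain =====

-- B replaces A's greedy counter scan by a backward run-length table plus a jump-over-runs driver; alternative decomposition, same result.


-- ===== PORT A =====
-- A's while loop. Python ints max_count/current_count are Int; the pointer i starts at 0 and only
-- grows, so it is a Nat, and `i <= len(region) - 6` is exactly `i + 6 ≤ r.length`.
-- `region[i:i+6] == pattern` is the code-point slice comparison, ported via toList (exact:
-- String equality is toList equality).
def pvAloop (r p : List Char) (maxc cur : Int) (i : Nat) : Int :=
  if h : i + 6 ≤ r.length then
    if PySem.List.slice r (some (i : Int)) (some ((i : Int) + 6)) = p then
      pvAloop r p maxc (cur + 1) (i + 6)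
    else
      pvAloop r p (max maxc cur) 0 (i + 1)
  else max maxc cur
termination_by r.length - i
decreasing_by all_goals omega

def count_telomeric_repeats (region : String) (pattern : String) : Int :=
  pvAloop region.toList pattern.toList 0 0 0

-- ===== PORT B =====
-- Source B: `run[j] = 1 + run.get(j+6, 0) if region[j:j+6] == pattern else 0` for j = n-6, ..., 0.
def pvStep (r p : List Char) (d : PySem.Dict Int Int) (j : Int) : PySem.Dict Int Int :=
  d.insert j (if PySem.List.slice r (some j) (some (j + 6)) = p then 1 + d.getD (j + 6) 0 else 0)

def pvBuildRun (r p : List Char) : PySem.Dict Int Int :=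
  (PySem.List.pyRange ((r.length : Int) - 6) (-1) (-1)).foldl (pvStep r p) PySem.Dict.empty

-- Source B's driver loop. `run[i]` is `getD i 0` (the key is present whenever it is read, so the
-- default is never returned); `if r:` on the stored count is `0 < r` (the counts are ≥ 0).
def pvBloop (r : List Char) (d : PySem.Dict Int Int) (best : Int) (i : Nat) : Int :=
  if h : i + 6 ≤ r.length then
    if h0 : 0 < d.getD (i : Int) 0 then
      pvBloop r d (max best (d.getD (i : Int) 0)) (i + 6 * (d.getD (i : Int) 0).toNat)
    else
      pvBloop r d best (i + 1)
  else best
termination_by r.length - i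
decreasing_by all_goals omega

def count_telomeric_repeats_alt (region : String) (pattern : String) : Int :=
  pvBloop region.toList (pvBuildRun region.toList pattern.toList) 0 0

-- ===== PRECONDITION & SPEC =====
def Spec_count_telomeric_repeats (region : String) (pattern : String) (out : Int) : Prop := out = count_telomeric_repeats_alt region pattern
instance (region : String) (pattern : String) (out : Int) : Decidable (Spec_count_telomeric_repeats region pattern out) := by unfold Spec_count_telomeric_repeats; infer_instance

-- ===== CLAIM (what is proved, stated in full; the proofs are below) =====
def Claim_equal_count_telomeric_repeats : Prop := ∀ (region : String) (pattern : String), Dom_count_telomeric_repeats region pattern → Spec_count_telomeric_repeats region pattern (count_telomeric_repeats region pattern)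

-- ===== LEMMAS AND PROOFS =====

-- The run-length function: number of consecutive non-overlapping pattern copies starting at i.
def pvRun (r p : List Char) (i : Nat) : Nat :=
  if h : i + 6 ≤ r.length ∧ PySem.List.slice r (some (i : Int)) (some ((i : Int) + 6)) = p then
    1 + pvRun r p (i + 6)
  else 0
termination_by r.length - i
decreasing_by omega

-- pvBloop with the dict lookups replaced by pvRun.
def pvBloopN (r p : List Char) (best : Int) (i : Nat) : Int :=
  if h : i + 6 ≤ r.length then
    if h0 : 0 < pvRun r p i then
      pvBloopN r p (max best (pvRun r p i)) (i + 6 * pvRun r p i)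
    else
      pvBloopN r p best (i + 1)
  else best
termination_by r.length - i
decreasing_by all_goals omega

theorem pvRun_zero_of_short (r p : List Char) (i : Nat) (h : r.length < i + 6) :
    pvRun r p i = 0 := by
  rw [pvRun, dif_neg (fun hc => absurd hc.1 (show ¬ (i + 6 ≤ r.length) by omega))]

theorem pvStep_value (r p : List Char) (m : Nat) (d : PySem.Dict Int Int)
    (hm : m + 6 ≤ r.length)
    (hd : ∀ j : Nat, m < j → d.getD (j : Int) 0 = (pvRun r p j : Int)) :
    pvStep r p d (m : Int) = d.insert (m : Int) (pvRun r p m : Int) := by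
  unfold pvStep
  congr 1
  by_cases hc : PySem.List.slice r (some (m : Int)) (some ((m : Int) + 6)) = p
  · rw [if_pos hc, pvRun, dif_pos ⟨hm, hc⟩]
    have hk : ((m : Int) + 6) = ((m + 6 : Nat) : Int) := by push_cast; ring
    rw [hk, hd (m + 6) (by omega)]
    push_cast
    ring
  · rw [if_neg hc, pvRun, dif_neg (fun hcc => hc hcc.2)]
    simp

theorem pvBuildRun_gen (r p : List Char) :
    ∀ (m : Nat), m + 6 ≤ r.length →
    ∀ (d : PySem.Dict Int Int),
      (∀ j : Nat, m < j → d.getD (j : Int) 0 = (pvRun r p j : Int)) →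
      ∀ j : Nat,
        ((PySem.List.pyRange (m : Int) (-1) (-1)).foldl (pvStep r p) d).getD (j : Int) 0 =
          if j ≤ m then (pvRun r p j : Int) else d.getD (j : Int) 0 := by
  intro m
  induction m with
  | zero =>
    intro h0 d hd j
    rw [PySem.List.pyRange_neg_one_cons (by omega)]
    have hnil : PySem.List.pyRange (((0 : Nat) : Int) - 1) (-1) (-1) = [] :=
      PySem.List.pyRange_neg_one_eq_nil (by omega)
    rw [hnil]
    simp only [List.foldl_cons, List.foldl_nil]
    rw [pvStep_value r p 0 d h0 hd, PySem.Dict.getD_insert]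
    by_cases hj : j = 0
    · simp [hj]
    · rw [if_neg (by exact_mod_cast hj), if_neg (by omega)]
  | succ k ih =>
    intro h d hd j
    rw [PySem.List.pyRange_neg_one_cons (by omega)]
    have hsub : ((k + 1 : Nat) : Int) - 1 = (k : Int) := by push_cast; ring
    rw [hsub]
    simp only [List.foldl_cons]
    rw [pvStep_value r p (k + 1) d (by omega) hd]
    have hd' : ∀ j : Nat, k < j →
        (d.insert ((k + 1 : Nat) : Int) (pvRun r p (k + 1) : Int)).getD (j : Int) 0 =
          (pvRun r p j : Int) := by
      intro j' hjk
      rw [PySem.Dict.getD_insert]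
      by_cases hje : j' = k + 1
      · rw [if_pos (by exact_mod_cast hje), hje]
      · rw [if_neg (by exact_mod_cast hje)]
        exact hd j' (by omega)
    rw [ih (by omega) _ hd' j]
    by_cases h1 : j ≤ k
    · rw [if_pos h1, if_pos (by omega)]
    · rw [if_neg h1, PySem.Dict.getD_insert]
      by_cases h2 : j = k + 1
      · rw [if_pos (by exact_mod_cast h2), if_pos (by omega), h2]
      · rw [if_neg (by exact_mod_cast h2), if_neg (by omega)]

theorem pvBuildRun_getD (r p : List Char) (j : Nat) :
    (pvBuildRun r p).getD (j : Int) 0 = (pvRun r p j : Int) := by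
  unfold pvBuildRun
  by_cases hlen : 6 ≤ r.length
  · have hcast : (r.length : Int) - 6 = ((r.length - 6 : Nat) : Int) := by push_cast [hlen]; ring
    rw [hcast]
    have hd0 : ∀ j' : Nat, r.length - 6 < j' →
        (PySem.Dict.empty : PySem.Dict Int Int).getD (j' : Int) 0 = (pvRun r p j' : Int) := by
      intro j' hj'
      rw [PySem.Dict.getD_empty, pvRun_zero_of_short r p j' (by omega)]
      simp
    rw [pvBuildRun_gen r p (r.length - 6) (by omega) PySem.Dict.empty hd0 j]
    by_cases hj : j ≤ r.length - 6
    · rw [if_pos hj]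
    · rw [if_neg hj, PySem.Dict.getD_empty, pvRun_zero_of_short r p j (by omega)]
      simp
  · rw [PySem.List.pyRange_neg_one_eq_nil (by omega)]
    simp only [List.foldl_nil]
    rw [PySem.Dict.getD_empty, pvRun_zero_of_short r p j (by omega)]
    simp

theorem pvBloop_eq_bloopN (r p : List Char) :
    ∀ (N i : Nat), r.length ≤ i + N → ∀ best : Int,
      pvBloop r (pvBuildRun r p) best i = pvBloopN r p best i := by
  intro N
  induction N with
  | zero =>
    intro i h best
    rw [pvBloop.eq_def, dif_neg (by omega), pvBloopN.eq_def, dif_neg (by omega)]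
  | succ N ih =>
    intro i h best
    by_cases h6 : i + 6 ≤ r.length
    · have hg : (pvBuildRun r p).getD (i : Int) 0 = (pvRun r p i : Int) :=
        pvBuildRun_getD r p i
      by_cases h0 : 0 < pvRun r p i
      · rw [pvBloop.eq_def, dif_pos h6, dif_pos (by rw [hg]; exact_mod_cast h0),
            pvBloopN.eq_def, dif_pos h6, dif_pos h0, hg]
        simpa using ih (i + 6 * pvRun r p i) (by omega) (max best (pvRun r p i : Int))
      · rw [pvBloop.eq_def, dif_pos h6,
            dif_neg (by rw [hg]; exact_mod_cast h0),
            pvBloopN.eq_def, dif_pos h6, dif_neg h0]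
        exact ih (i + 1) (by omega) best
    · rw [pvBloop.eq_def, dif_neg h6, pvBloopN.eq_def, dif_neg h6]

theorem pvBloopN_max (r p : List Char) :
    ∀ (N i : Nat), r.length ≤ i + N → ∀ best : Int, 0 ≤ best →
      pvBloopN r p best i = max best (pvBloopN r p 0 i) := by
  intro N
  induction N with
  | zero =>
    intro i h best hb
    rw [pvBloopN.eq_def r p best i, dif_neg (by omega), pvBloopN.eq_def r p 0 i,
        dif_neg (by omega)]
    omega
  | succ N ih =>
    intro i h best hb
    by_cases h6 : i + 6 ≤ r.length
    · by_cases h0 : 0 < pvRun r p i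
      · rw [pvBloopN.eq_def r p best i, dif_pos h6, dif_pos h0,
            pvBloopN.eq_def r p 0 i, dif_pos h6, dif_pos h0]
        have hk : (0 : Int) ≤ (pvRun r p i : Int) := Int.natCast_nonneg _
        rw [ih (i + 6 * pvRun r p i) (by omega) (max best (pvRun r p i : Int)) (by omega),
            ih (i + 6 * pvRun r p i) (by omega) (max 0 (pvRun r p i : Int)) (by omega)]
        omega
      · rw [pvBloopN.eq_def r p best i, dif_pos h6, dif_neg h0,
            pvBloopN.eq_def r p 0 i, dif_pos h6, dif_neg h0]
        exact ih (i + 1) (by omega) best hb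
    · rw [pvBloopN.eq_def r p best i, dif_neg h6, pvBloopN.eq_def r p 0 i, dif_neg h6]
      omega

theorem pvBloopN_step (r p : List Char) (i : Nat) :
    pvBloopN r p 0 i = max (pvRun r p i : Int) (pvBloopN r p 0 (i + 6 * pvRun r p i)) := by
  by_cases h6 : i + 6 ≤ r.length
  · by_cases h0 : 0 < pvRun r p i
    · rw [pvBloopN.eq_def r p 0 i, dif_pos h6, dif_pos h0,
          pvBloopN_max r p r.length (i + 6 * pvRun r p i) (by omega)
            (max 0 (pvRun r p i : Int)) (by omega)]
      have hk : (0 : Int) ≤ (pvRun r p i : Int) := Int.natCast_nonneg _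
      omega
    · have hr : pvRun r p i = 0 := by omega
      conv_lhs => rw [pvBloopN_max r p r.length i (by omega) 0 le_rfl]
      simp [hr]
  · have hr : pvRun r p i = 0 := pvRun_zero_of_short r p i (by omega)
    have hz : pvBloopN r p 0 i = 0 := by rw [pvBloopN.eq_def, dif_neg h6]
    simp [hr, hz]

theorem pvAloop_eq (r p : List Char) :
    ∀ (N i : Nat), r.length ≤ i + N → ∀ maxc cur : Int, 0 ≤ cur →
      pvAloop r p maxc cur i =
        max maxc (max (cur + (pvRun r p i : Int)) (pvBloopN r p 0 (i + 6 * pvRun r p i))) := by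
  intro N
  induction N with
  | zero =>
    intro i h maxc cur hcur
    have h6 : ¬ (i + 6 ≤ r.length) := by omega
    have hr : pvRun r p i = 0 := pvRun_zero_of_short r p i (by omega)
    have hz : pvBloopN r p 0 i = 0 := by rw [pvBloopN.eq_def, dif_neg h6]
    rw [pvAloop.eq_def, dif_neg h6]
    simp only [hr, Nat.mul_zero, Nat.add_zero, Nat.cast_zero, Int.add_zero, hz]
    omega
  | succ N ih =>
    intro i h maxc cur hcur
    by_cases h6 : i + 6 ≤ r.length
    · by_cases hm : PySem.List.slice r (some (i : Int)) (some ((i : Int) + 6)) = p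
      · have hr : pvRun r p i = 1 + pvRun r p (i + 6) := by rw [pvRun, dif_pos ⟨h6, hm⟩]
        have harg : i + 6 * (1 + pvRun r p (i + 6)) = (i + 6) + 6 * pvRun r p (i + 6) := by ring
        rw [pvAloop.eq_def, dif_pos h6, if_pos hm,
            ih (i + 6) (by omega) maxc (cur + 1) (by omega), hr, harg]
        push_cast
        omega
      · have hr : pvRun r p i = 0 := by rw [pvRun, dif_neg (fun hc => hm hc.2)]
        rw [pvAloop.eq_def, dif_pos h6, if_neg hm,
            ih (i + 1) (by omega) (max maxc cur) 0 le_rfl]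
        have hbz : pvBloopN r p 0 i = pvBloopN r p 0 (i + 1) := by
          rw [pvBloopN.eq_def r p 0 i, dif_pos h6, dif_neg (by omega)]
        have hstep := pvBloopN_step r p (i + 1)
        have hk : (0 : Int) ≤ (pvRun r p (i + 1) : Int) := Int.natCast_nonneg _
        simp only [hr, Nat.mul_zero, Nat.add_zero, Nat.cast_zero, Int.add_zero, hbz, hstep]
        omega
    · have hr : pvRun r p i = 0 := pvRun_zero_of_short r p i (by omega)
      have hz : pvBloopN r p 0 i = 0 := by rw [pvBloopN.eq_def, dif_neg h6]
      rw [pvAloop.eq_def, dif_neg h6]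
      simp only [hr, Nat.mul_zero, Nat.add_zero, Nat.cast_zero, Int.add_zero, hz]
      omega

-- ===== VERDICT (by name: the statement is the Claim_ definition above) =====
theorem count_telomeric_repeats_spec : Claim_equal_count_telomeric_repeats := by
  intro region pattern _
  unfold Spec_count_telomeric_repeats count_telomeric_repeats count_telomeric_repeats_alt
  rw [pvAloop_eq region.toList pattern.toList region.toList.length 0 (by omega) 0 0 le_rfl,
      pvBloop_eq_bloopN region.toList pattern.toList region.toList.length 0 (by omega),
]
  conv_rhs => rw [pvBloopN_step]
  have h0 : (0 : Int) ≤ (pvRun region.toList pattern.toList 0 : Int) := Int.natCast_nonneg _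
  omega
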